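-- pv_equiv track=rewrite | github.com/muonium-ai/simplegames | 2048/solver/2048_solver2.py | calculate_merges
-- ===== SOURCE A (Python) =====
-- def calculate_merges(grid):
--     """Count possible merges by checking adjacent cells."""
--     merges = 0
--     for i in range(4):
--         for j in range(4):
--             if i < 3 and grid[i][j] == grid[i + 1][j]:
--                 merges += grid[i][j]
--             if j < 3 and grid[i][j] == grid[i][j + 1]:
--                 merges += grid[i][j]
--     return merges
-- ===== SOURCE B (Python) =====
-- def _row_merges(rows):
--     """Sum of r[j] over all rows r and positions j where r[j] == r[j+1]."""
--     total = 0
--     for r in rows: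
--         for j in range(len(r) - 1):
--             if r[j] == r[j + 1]:
--                 total += r[j]
--     return total
--
--
-- def calculate_merges(grid):
--     """Count possible merges by checking adjacent cells."""
--     board = [[grid[i][j] for j in range(4)] for i in range(4)]
--     cols = [list(c) for c in zip(*board)]
--     return _row_merges(board) + _row_merges(cols)
-- ===== Notes on version B (the rewrite author's own statement) =====
-- stated objective: idiomatic
-- what changed: Replaces the single interleaved nested index loop (with its i<3/j<3 guards) by one uniform adjacent-pair row scan applied twice: once to the 4x4 board for horizontal merges and once to its transpose (zip(*board)) for vertical merges.
import Mathlib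
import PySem

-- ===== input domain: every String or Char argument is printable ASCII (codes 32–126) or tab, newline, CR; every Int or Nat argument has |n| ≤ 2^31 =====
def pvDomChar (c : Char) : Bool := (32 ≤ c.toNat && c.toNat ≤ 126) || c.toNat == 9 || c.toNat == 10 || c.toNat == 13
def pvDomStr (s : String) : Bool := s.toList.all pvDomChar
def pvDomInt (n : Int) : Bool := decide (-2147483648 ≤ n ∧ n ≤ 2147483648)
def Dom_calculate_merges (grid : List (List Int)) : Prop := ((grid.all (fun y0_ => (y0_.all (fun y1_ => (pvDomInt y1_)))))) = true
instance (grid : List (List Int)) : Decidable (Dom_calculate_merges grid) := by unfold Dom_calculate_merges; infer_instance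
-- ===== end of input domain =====

-- B restructures A's interleaved 4x4 index loop as one uniform adjacent-pair row scan run on the
-- board and on its transpose (idiomatic decomposition; same cost; return-value equivalence on Pre_).

-- ===== PORT A =====
-- literal port of A's nested index loop; grid[i][j] is pyGetD (always in range when Pre_ holds)
def calculate_merges (grid : List (List Int)) : Int :=
  (PySem.List.pyRange 0 4 1).foldl (fun merges i =>
    (PySem.List.pyRange 0 4 1).foldl (fun merges j =>
      let merges :=
        if i < 3 ∧ PySem.List.pyGetD (PySem.List.pyGetD grid i []) j 0
                    = PySem.List.pyGetD (PySem.List.pyGetD grid (i + 1) []) j 0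
        then merges + PySem.List.pyGetD (PySem.List.pyGetD grid i []) j 0 else merges
      if j < 3 ∧ PySem.List.pyGetD (PySem.List.pyGetD grid i []) j 0
                  = PySem.List.pyGetD (PySem.List.pyGetD grid i []) (j + 1) 0
      then merges + PySem.List.pyGetD (PySem.List.pyGetD grid i []) j 0 else merges) merges) 0

-- ===== PORT B =====
-- _row_merges: sum r[j] over all rows r and adjacent positions with r[j] == r[j+1]
def rowMerges (rows : List (List Int)) : Int :=
  rows.foldl (fun total r =>
    (PySem.List.pyRange 0 ((r.length : Int) - 1) 1).foldl (fun total j =>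
      if PySem.List.pyGetD r j 0 = PySem.List.pyGetD r (j + 1) 0
      then total + PySem.List.pyGetD r j 0 else total) total) 0

-- hand port of zip(*rows): truncating transpose (zip stops at the shortest iterable; exact)
def zipStar : List Int → List (List Int) → List (List Int)
  | [], _ => []
  | a :: r, rs =>
    if rs.all (fun x => !x.isEmpty) then
      (a :: rs.map (fun x => x.headD 0)) :: zipStar r (rs.map List.tail)
    else []

def calculate_merges_alt (grid : List (List Int)) : Int :=
  let board := (PySem.List.pyRange 0 4 1).map (fun i =>
    (PySem.List.pyRange 0 4 1).map (fun j => PySem.List.pyGetD (PySem.List.pyGetD grid i []) j 0))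
  let cols := match board with | [] => [] | r :: rs => zipStar r rs
  rowMerges board + rowMerges cols

-- ===== PRECONDITION & SPEC =====
-- exactly the inputs where A's indexing stays in range: ≥ 4 rows, first four rows each ≥ 4 cells
def Pre_calculate_merges (grid : List (List Int)) : Prop :=
  4 ≤ grid.length ∧ ∀ r ∈ grid.take 4, 4 ≤ r.length
instance (grid : List (List Int)) : Decidable (Pre_calculate_merges grid) := by
  unfold Pre_calculate_merges; infer_instance

def pvWitness_calculate_merges : List (List Int) :=
  [[2, 2, 4, 8], [2, 0, 4, 4], [0, 0, 2, 8], [4, 4, 2, 2]]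

def Spec_calculate_merges (grid : List (List Int)) (out : Int) : Prop := out = calculate_merges_alt grid
instance (grid : List (List Int)) (out : Int) : Decidable (Spec_calculate_merges grid out) := by unfold Spec_calculate_merges; infer_instance

-- ===== CLAIM (what is proved, stated in full; the proofs are below) =====
def Claim_equal_calculate_merges : Prop := ∀ (grid : List (List Int)), Dom_calculate_merges grid → Pre_calculate_merges grid → Spec_calculate_merges grid (calculate_merges grid)

-- ===== LEMMAS AND PROOFS =====

theorem ite_add_eq (c : Prop) [Decidable c] (m x : Int) :
    (if c then m + x else m) = m + (if c then x else 0) := by split <;> simp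

-- on a grid whose first four rows each expose four cells, both ports compute the same 24-term sum
theorem calculate_merges_key (a0 a1 a2 a3 b0 b1 b2 b3 c0 c1 c2 c3 d0 d1 d2 d3 : Int)
    (t0 t1 t2 t3 : List Int) (rest : List (List Int)) :
    calculate_merges ((a0::a1::a2::a3::t0) :: (b0::b1::b2::b3::t1) ::
        (c0::c1::c2::c3::t2) :: (d0::d1::d2::d3::t3) :: rest)
      = calculate_merges_alt ((a0::a1::a2::a3::t0) :: (b0::b1::b2::b3::t1) ::
        (c0::c1::c2::c3::t2) :: (d0::d1::d2::d3::t3) :: rest) := by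
  have hr4 : PySem.List.pyRange 0 4 1 = [0, 1, 2, 3] := by decide
  simp only [calculate_merges, calculate_merges_alt, rowMerges, zipStar, hr4,
    List.map_cons, List.map_nil,
    List.length_cons, List.length_nil, List.all_cons, List.all_nil, List.isEmpty_cons,
    List.tail_cons, List.headD_cons, Bool.not_false, Bool.and_self, if_true,
    List.foldl_cons, List.foldl_nil, ite_add_eq]
  norm_num [PySem.List.pyGetD_ofNat', List.getD]
  have hr3 : PySem.List.pyRange 0 3 1 = [0, 1, 2] := by decide
  simp only [hr3, List.foldl_cons, List.foldl_nil]
  norm_num [PySem.List.pyGetD_ofNat', List.getD]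
  ring

-- ===== VERDICT (by name: the statement is the Claim_ definition above) =====
theorem calculate_merges_spec : Claim_equal_calculate_merges := by
  intro grid _ hpre
  obtain ⟨hlen, hrows⟩ := hpre
  rcases grid with _ | ⟨r0, _ | ⟨r1, _ | ⟨r2, _ | ⟨r3, rest⟩⟩⟩⟩ <;> simp at hlen
  have h0 := hrows r0 (by simp)
  have h1 := hrows r1 (by simp)
  have h2 := hrows r2 (by simp)
  have h3 := hrows r3 (by simp)
  rcases r0 with _ | ⟨a0, _ | ⟨a1, _ | ⟨a2, _ | ⟨a3, t0⟩⟩⟩⟩ <;> simp at h0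
  rcases r1 with _ | ⟨b0, _ | ⟨b1, _ | ⟨b2, _ | ⟨b3, t1⟩⟩⟩⟩ <;> simp at h1
  rcases r2 with _ | ⟨c0, _ | ⟨c1, _ | ⟨c2, _ | ⟨c3, t2⟩⟩⟩⟩ <;> simp at h2
  rcases r3 with _ | ⟨d0, _ | ⟨d1, _ | ⟨d2, _ | ⟨d3, t3⟩⟩⟩⟩ <;> simp at h3
  exact calculate_merges_key a0 a1 a2 a3 b0 b1 b2 b3 c0 c1 c2 c3 d0 d1 d2 d3 t0 t1 t2 t3 rest
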